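-- pv_equiv track=rewrite | github.com/Krotiara/Checkers_from_bit | 100checkers/Game/Checkers.py | get_list_neighbors
-- ===== SOURCE A (Python) =====
-- def get_list_neighbors(diag, pos_cell, param):
--     neighbors = []
--     if param == "hack":
--         for i in range(-2, 3):
--             if pos_cell + i > len(diag) - 1 or pos_cell + i < 0:
--                 continue
--             else:
--                 neighbors.append(diag[pos_cell + i])
--         return neighbors
--     else:
--         for i in range(-1, 2):
--             if pos_cell + i > len(diag) - 1 or pos_cell + i < 0:
--                 continue
--             else:
--                 neighbors.append(diag[pos_cell + i])
--         return neighbors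
-- ===== SOURCE B (Python) =====
-- def get_list_neighbors(diag, pos_cell, param):
--     r = 2 if param == "hack" else 1
--     start = max(0, pos_cell - r)
--     stop = max(0, min(len(diag), pos_cell + r + 1))
--     return diag[start:stop]
-- ===== Notes on version B (the rewrite author's own statement) =====
-- stated objective: simpler
-- what changed: Replaces the two near-duplicate bounds-checking append loops by one clamped-window computation: radius from param, endpoints by max/min arithmetic, and a single slice diag[start:stop].
import Mathlib
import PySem

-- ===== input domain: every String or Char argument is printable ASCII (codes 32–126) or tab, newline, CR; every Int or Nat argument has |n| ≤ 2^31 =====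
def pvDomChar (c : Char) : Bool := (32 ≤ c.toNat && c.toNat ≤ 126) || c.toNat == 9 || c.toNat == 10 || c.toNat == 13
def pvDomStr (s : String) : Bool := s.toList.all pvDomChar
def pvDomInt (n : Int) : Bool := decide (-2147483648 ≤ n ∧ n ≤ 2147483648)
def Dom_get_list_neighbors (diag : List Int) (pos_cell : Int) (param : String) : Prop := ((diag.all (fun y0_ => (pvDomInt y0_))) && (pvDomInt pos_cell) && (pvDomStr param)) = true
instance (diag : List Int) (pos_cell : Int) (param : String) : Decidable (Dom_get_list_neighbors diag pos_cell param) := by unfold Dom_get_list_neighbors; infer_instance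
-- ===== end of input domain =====

-- ===== PORT A =====
-- B replaces A's two bounds-checking append loops by clamped endpoints and one slice (objective: simpler).
def get_list_neighbors (diag : List Int) (pos_cell : Int) (param : String) : List Int :=
  if param == "hack" then
    (PySem.List.pyRange (-2) 3 1).foldl
      (fun neighbors i =>
        if pos_cell + i > (diag.length : Int) - 1 ∨ pos_cell + i < 0 then neighbors
        else neighbors ++ [PySem.List.pyGetD diag (pos_cell + i) 0]) []
  else
    (PySem.List.pyRange (-1) 2 1).foldl
      (fun neighbors i =>
        if pos_cell + i > (diag.length : Int) - 1 ∨ pos_cell + i < 0 then neighbors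
        else neighbors ++ [PySem.List.pyGetD diag (pos_cell + i) 0]) []

-- ===== PORT B =====
def get_list_neighbors_alt (diag : List Int) (pos_cell : Int) (param : String) : List Int :=
  let r : Int := if param == "hack" then 2 else 1
  let start := max 0 (pos_cell - r)
  let stop := max 0 (min (diag.length : Int) (pos_cell + r + 1))
  PySem.List.slice diag (some start) (some stop)

-- ===== PRECONDITION & SPEC =====
def Spec_get_list_neighbors (diag : List Int) (pos_cell : Int) (param : String) (out : List Int) : Prop := out = get_list_neighbors_alt diag pos_cell param
instance (diag : List Int) (pos_cell : Int) (param : String) (out : List Int) : Decidable (Spec_get_list_neighbors diag pos_cell param out) := by unfold Spec_get_list_neighbors; infer_instance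

-- ===== CLAIM (what is proved, stated in full; the proofs are below) =====
def Claim_equal_get_list_neighbors : Prop := ∀ (diag : List Int) (pos_cell : Int) (param : String), Dom_get_list_neighbors diag pos_cell param → Spec_get_list_neighbors diag pos_cell param (get_list_neighbors diag pos_cell param)

-- ===== LEMMAS AND PROOFS =====

-- filtering an integer range by an interval condition is the intersected range
lemma filter_pyRange_interval (a b lo hi : Int) :
    (PySem.List.pyRange a b 1).filter (fun i => decide (lo ≤ i ∧ i < hi))
      = PySem.List.pyRange (max a lo) (min b hi) 1 := by
  apply PySem.List.eq_of_perm_of_pairwise_le_of_injective (fun x : Int => x) (fun _ _ h => h)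
  · rw [List.perm_ext_iff_of_nodup
      ((PySem.List.nodup_pyRange_one a b).filter _) (PySem.List.nodup_pyRange_one _ _)]
    intro x
    simp [List.mem_filter, PySem.List.mem_pyRange_one]
    omega
  · exact ((PySem.List.pairwise_lt_pyRange_one a b).filter _).imp le_of_lt
  · exact (PySem.List.pairwise_lt_pyRange_one _ _).imp le_of_lt

-- shifting the index variable of a mapped range
lemma map_pyRange_shift (g : Int → Int) (p a b : Int) :
    (PySem.List.pyRange a b 1).map (fun i => g (p + i))
      = (PySem.List.pyRange (p + a) (p + b) 1).map g := by
  rw [PySem.List.pyRange_one a b, PySem.List.pyRange_one (p + a) (p + b)]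
  have hn : (p + b - (p + a)).toNat = (b - a).toNat := by omega
  rw [hn, List.map_map, List.map_map]
  apply List.map_congr_left
  intro k _
  simp only [Function.comp_apply]
  ring_nf

-- the in-bounds window of getD-indexed elements is the drop/take slice
lemma map_pyRange_pyGetD_window (diag : List Int) (lo hi : Int)
    (h0 : 0 ≤ lo) (h1 : lo ≤ hi) (h2 : hi ≤ (diag.length : Int)) :
    (PySem.List.pyRange lo hi 1).map (fun j => PySem.List.pyGetD diag j 0)
      = (diag.drop lo.toNat).take (hi.toNat - lo.toNat) := by
  have hsplit := PySem.List.pyRange_one_append lo hi (diag.length : Int) h1 h2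
  have hlo := PySem.List.map_pyGetD_pyRange' diag 0 h0
  have hhi := PySem.List.map_pyGetD_pyRange' diag 0 (le_trans h0 h1)
  rw [hsplit, List.map_append, hhi] at hlo
  have hlen : ((PySem.List.pyRange lo hi 1).map
      (fun j => PySem.List.pyGetD diag j 0)).length = hi.toNat - lo.toNat := by
    rw [List.length_map, PySem.List.length_pyRange_one]; omega
  rw [← hlo, List.take_left' hlen]

-- one loop of A (radius r) equals one clamped slice of B
lemma loop_eq_slice (diag : List Int) (p r : Int) :
    (PySem.List.pyRange (-r) (r + 1) 1).foldl
      (fun neighbors i =>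
        if p + i > (diag.length : Int) - 1 ∨ p + i < 0 then neighbors
        else neighbors ++ [PySem.List.pyGetD diag (p + i) 0]) []
      = PySem.List.slice diag (some (max 0 (p - r)))
          (some (max 0 (min (diag.length : Int) (p + r + 1)))) := by
  have h1 : (PySem.List.pyRange (-r) (r + 1) 1).foldl
      (fun neighbors i =>
        if p + i > (diag.length : Int) - 1 ∨ p + i < 0 then neighbors
        else neighbors ++ [PySem.List.pyGetD diag (p + i) 0]) []
      = (PySem.List.pyRange (-r) (r + 1) 1).foldl
      (fun neighbors i =>
        if ¬ (p + i > (diag.length : Int) - 1 ∨ p + i < 0) then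
          neighbors ++ [PySem.List.pyGetD diag (p + i) 0] else neighbors) [] := by
    apply PySem.List.foldl_congr_mem
    intro acc x _
    split_ifs with hA hB <;> first | rfl | omega
  rw [h1, PySem.List.foldl_append_ite]
  have h2 : (PySem.List.pyRange (-r) (r + 1) 1).filter
      (fun i => decide (¬ (p + i > (diag.length : Int) - 1 ∨ p + i < 0)))
      = (PySem.List.pyRange (-r) (r + 1) 1).filter
      (fun i => decide ((-p) ≤ i ∧ i < (diag.length : Int) - p)) := by
    apply List.filter_congr
    intro x _
    simp only [decide_eq_decide]
    omega
  rw [h2, filter_pyRange_interval, List.nil_append,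
      map_pyRange_shift (fun j => PySem.List.pyGetD diag j 0) p]
  set n : Int := (diag.length : Int) with hn
  have hstart : p + max (-r) (-p) = max 0 (p - r) := by omega
  have hstop : p + min (r + 1) (n - p) = min n (p + r + 1) := by omega
  rw [hstart, hstop]
  by_cases hcase : max 0 (p - r) < min n (p + r + 1)
  · -- nonempty window
    have h0 : (0 : Int) ≤ max 0 (p - r) := le_max_left _ _
    rw [map_pyRange_pyGetD_window diag _ _ h0 (le_of_lt hcase) (min_le_left _ _)]
    have hst : max 0 (min n (p + r + 1)) = min n (p + r + 1) := by omega
    rw [hst, PySem.List.slice_toNat diag h0 (by omega)]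
  · -- empty window on both sides
    rw [PySem.List.pyRange_one_eq_nil (by omega), List.map_nil,
        PySem.List.slice_toNat diag (le_max_left _ _) (le_max_left _ _)]
    have hz : (max 0 (min n (p + r + 1))).toNat - (max 0 (p - r)).toNat = 0 := by omega
    rw [hz, List.take_zero]

-- ===== VERDICT (by name: the statement is the Claim_ definition above) =====
theorem get_list_neighbors_spec : Claim_equal_get_list_neighbors := by
  intro diag pos_cell param _
  unfold Spec_get_list_neighbors get_list_neighbors get_list_neighbors_alt
  by_cases h : param == "hack" <;> simp only [h, if_pos, Bool.false_eq_true, ite_false]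
  · have := loop_eq_slice diag pos_cell 2
    norm_num at this ⊢
    exact this
  · have := loop_eq_slice diag pos_cell 1
    norm_num at this ⊢
    exact this
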